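-- pv_equiv track=rewrite | github.com/egfiwhfe/gg | kalshi_api.py | _detect_sport_from_ticker
-- ===== SOURCE A (Python) =====
-- def _detect_sport_from_ticker(ticker: str) -> str:
--     """Detect sport type from ticker"""
--     ticker_lower = ticker.lower()
--     if 'nba' in ticker_lower:
--         return 'basketball'
--     elif 'nfl' in ticker_lower:
--         return 'football'
--     elif 'nhl' in ticker_lower:
--         return 'hockey'
--     elif any(keyword in ticker_lower for keyword in ['cs2', 'csgo']):
--         return 'cs2'
--     elif 'dota' in ticker_lower:
--         return 'dota2'
--     elif 'lol' in ticker_lower: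
--         return 'lol'
--     elif 'valorant' in ticker_lower:
--         return 'valorant'
--     elif 'esport' in ticker_lower:
--         return 'other'
--     else:
--         return 'other'
-- ===== SOURCE B (Python) =====
-- _SPORT_INDEX = {
--     'nba': ('nba', 0), 'nfl': ('nfl', 1), 'nhl': ('nhl', 2),
--     'cs2': ('cs2', 3), 'csg': ('csgo', 3), 'dot': ('dota', 4),
--     'lol': ('lol', 5), 'val': ('valorant', 6), 'esp': ('esport', 7),
-- }
-- _LABELS = ['basketball', 'football', 'hockey', 'cs2', 'dota2', 'lol', 'valorant', 'other', 'other']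
--
-- def _detect_sport_from_ticker(ticker: str) -> str:
--     # Single left-to-right scan: every keyword has a distinct 3-char prefix, so
--     # hash each 3-char window into the index, verify the full keyword there, and
--     # keep the best (lowest-precedence-number) keyword seen anywhere in the string.
--     tl = ticker.lower()
--     best = 8
--     for i in range(len(tl) - 2):
--         hit = _SPORT_INDEX.get(tl[i:i+3])
--         if hit is not None:
--             kw, rank = hit
--             if rank < best and tl[i:i+len(kw)] == kw:
--                 best = rank
--     return _LABELS[best]
-- ===== Notes on version B (the rewrite author's own statement) =====
-- stated objective: alternative
-- what changed: Replaced the eight-way if-elif ladder of independent substring searches by a single left-to-right scan that hashes each 3-character window of the lowercased ticker into a keyword index (every keyword has a distinct 3-char prefix), verifies the full keyword at that position, and keeps the lowest precedence rank found, returning its label.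
import Mathlib
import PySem

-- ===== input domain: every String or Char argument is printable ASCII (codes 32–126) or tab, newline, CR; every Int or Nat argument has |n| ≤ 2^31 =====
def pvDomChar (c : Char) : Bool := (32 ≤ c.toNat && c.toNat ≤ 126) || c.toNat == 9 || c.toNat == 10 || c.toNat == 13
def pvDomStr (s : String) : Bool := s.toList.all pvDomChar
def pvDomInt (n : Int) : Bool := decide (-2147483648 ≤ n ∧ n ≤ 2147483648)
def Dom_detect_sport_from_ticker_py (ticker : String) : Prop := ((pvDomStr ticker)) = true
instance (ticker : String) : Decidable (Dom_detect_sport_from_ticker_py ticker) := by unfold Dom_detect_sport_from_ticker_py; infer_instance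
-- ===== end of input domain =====

-- B replaces A's eight-way if-elif ladder of substring tests by a single left-to-right scan
-- that hashes each 3-character window into a keyword index, verifies the full keyword, and
-- keeps the lowest precedence rank found (objective: alternative).

-- ===== PORT A =====
def detect_sport_from_ticker_py (ticker : String) : String :=
  let ticker_lower := PySem.Str.lower ticker
  if PySem.Str.isIn "nba" ticker_lower then "basketball"
  else if PySem.Str.isIn "nfl" ticker_lower then "football"
  else if PySem.Str.isIn "nhl" ticker_lower then "hockey"
  else if ["cs2", "csgo"].any (fun keyword => PySem.Str.isIn keyword ticker_lower) then "cs2"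
  else if PySem.Str.isIn "dota" ticker_lower then "dota2"
  else if PySem.Str.isIn "lol" ticker_lower then "lol"
  else if PySem.Str.isIn "valorant" ticker_lower then "valorant"
  else if PySem.Str.isIn "esport" ticker_lower then "other"
  else "other"

-- ===== PORT B =====
-- _SPORT_INDEX: each keyword keyed by its (distinct) first three characters.
def pvKwIndex : PySem.Dict String (String × Int) :=
  PySem.Dict.mk [("nba", ("nba", 0)), ("nfl", ("nfl", 1)), ("nhl", ("nhl", 2)),
    ("cs2", ("cs2", 3)), ("csg", ("csgo", 3)), ("dot", ("dota", 4)),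
    ("lol", ("lol", 5)), ("val", ("valorant", 6)), ("esp", ("esport", 7))]

def pvLabels : List String :=
  ["basketball", "football", "hockey", "cs2", "dota2", "lol", "valorant", "other", "other"]

-- loop body of Source B: look the 3-char window up, verify the full keyword, keep the best rank
def pvScanStep (tl : String) (best : Int) (i : Int) : Int :=
  match PySem.Dict.get? pvKwIndex (PySem.Str.slice tl (some i) (some (i + 3))) with
  | some hit =>
      if hit.2 < best ∧ PySem.Str.slice tl (some i) (some (i + PySem.Str.len hit.1)) = hit.1 then
        hit.2
      else best
  | none => best

def detect_sport_from_ticker_py_alt (ticker : String) : String :=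
  let tl := PySem.Str.lower ticker
  let best := (PySem.List.pyRange 0 (PySem.Str.len tl - 2) 1).foldl (pvScanStep tl) 8
  -- _LABELS[best]: best is always in [0, 8], so the default is never used
  PySem.List.pyGetD pvLabels best ""

-- ===== PRECONDITION & SPEC =====
def Spec_detect_sport_from_ticker_py (ticker : String) (out : String) : Prop := out = detect_sport_from_ticker_py_alt ticker
instance (ticker : String) (out : String) : Decidable (Spec_detect_sport_from_ticker_py ticker out) := by unfold Spec_detect_sport_from_ticker_py; infer_instance

-- ===== CLAIM (what is proved, stated in full; the proofs are below) =====
def Claim_equal_detect_sport_from_ticker_py : Prop := ∀ (ticker : String), Dom_detect_sport_from_ticker_py ticker → Spec_detect_sport_from_ticker_py ticker (detect_sport_from_ticker_py ticker)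

-- ===== LEMMAS AND PROOFS =====

-- the table of pvKwIndex as (prefix, keyword, rank) triples
def pvEntries : List (String × String × Int) :=
  [("nba", "nba", 0), ("nfl", "nfl", 1), ("nhl", "nhl", 2), ("cs2", "cs2", 3),
   ("csg", "csgo", 3), ("dot", "dota", 4), ("lol", "lol", 5), ("val", "valorant", 6),
   ("esp", "esport", 7)]

-- the rank contributed by position i, independent of the running best
def pvV (tl : String) (i : Int) : Int :=
  match PySem.Dict.get? pvKwIndex (PySem.Str.slice tl (some i) (some (i + 3))) with
  | some hit =>
      if PySem.Str.slice tl (some i) (some (i + PySem.Str.len hit.1)) = hit.1 then hit.2 else 8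
  | none => 8

theorem pvGet?_table (w : String) (hit : String × Int)
    (h : PySem.Dict.get? pvKwIndex w = some hit) : (w, hit) ∈ pvEntries := by
  unfold pvKwIndex at h
  simp only [PySem.Dict.get?_mk_cons] at h
  split_ifs at h with h1 h2 h3 h4 h5 h6 h7 h8 h9
  · exact (beq_iff_eq.mp h1) ▸ (Option.some_inj.mp h) ▸ (by simp [pvEntries])
  · exact (beq_iff_eq.mp h2) ▸ (Option.some_inj.mp h) ▸ (by simp [pvEntries])
  · exact (beq_iff_eq.mp h3) ▸ (Option.some_inj.mp h) ▸ (by simp [pvEntries])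
  · exact (beq_iff_eq.mp h4) ▸ (Option.some_inj.mp h) ▸ (by simp [pvEntries])
  · exact (beq_iff_eq.mp h5) ▸ (Option.some_inj.mp h) ▸ (by simp [pvEntries])
  · exact (beq_iff_eq.mp h6) ▸ (Option.some_inj.mp h) ▸ (by simp [pvEntries])
  · exact (beq_iff_eq.mp h7) ▸ (Option.some_inj.mp h) ▸ (by simp [pvEntries])
  · exact (beq_iff_eq.mp h8) ▸ (Option.some_inj.mp h) ▸ (by simp [pvEntries])
  · exact (beq_iff_eq.mp h9) ▸ (Option.some_inj.mp h) ▸ (by simp [pvEntries])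
  · simp [PySem.Dict.get?] at h

theorem pvWindow_toList (tl : String) (j m : Nat) :
    (PySem.Str.slice tl (some (j : Int)) (some ((j : Int) + (m : Int)))).toList =
      (tl.toList.drop j).take m := by
  simp [PySem.List.slice_natCast_add]

theorem pvStep_eq_min (tl : String) (best i : Int) (h : best ≤ 8) :
    pvScanStep tl best i = min best (pvV tl i) := by
  unfold pvScanStep pvV
  cases hg : PySem.Dict.get? pvKwIndex (PySem.Str.slice tl (some i) (some (i + 3))) with
  | none =>
      show best = min best 8
      omega
  | some hit =>
      show (if hit.2 < best ∧ PySem.Str.slice tl (some i) (some (i + PySem.Str.len hit.1)) = hit.1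
          then hit.2 else best)
        = min best (if PySem.Str.slice tl (some i) (some (i + PySem.Str.len hit.1)) = hit.1
          then hit.2 else 8)
      by_cases hf : PySem.Str.slice tl (some i) (some (i + PySem.Str.len hit.1)) = hit.1
      · simp only [hf, and_true, if_true]
        split_ifs <;> omega
      · simp only [hf, and_false, if_false]
        omega

theorem pvFold_min (tl : String) (L : List Int) :
    ∀ b : Int, b ≤ 8 →
      L.foldl (pvScanStep tl) b = L.foldl (fun b i => min b (pvV tl i)) b := by
  induction L with
  | nil => intro b _; rfl
  | cons a L ih =>
      intro b hb
      simp only [List.foldl_cons]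
      rw [pvStep_eq_min tl b a hb]
      exact ih _ (by omega)

theorem pvFoldMin_le (tl : String) (L : List Int) :
    ∀ b : Int, L.foldl (fun b i => min b (pvV tl i)) b ≤ b := by
  induction L with
  | nil => intro b; simp
  | cons a L ih =>
      intro b
      simp only [List.foldl_cons]
      exact le_trans (ih _) (by omega)

theorem pvFoldMin_le_v (tl : String) (L : List Int) :
    ∀ b : Int, ∀ i ∈ L, L.foldl (fun b i => min b (pvV tl i)) b ≤ pvV tl i := by
  induction L with
  | nil => intro b i hi; cases hi
  | cons a L ih =>
      intro b i hi
      simp only [List.foldl_cons]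
      rcases List.mem_cons.mp hi with rfl | hi
      · exact le_trans (pvFoldMin_le tl L _) (by omega)
      · exact ih _ i hi

theorem pvFoldMin_cases (tl : String) (L : List Int) :
    ∀ b : Int, L.foldl (fun b i => min b (pvV tl i)) b = b ∨
      ∃ i ∈ L, L.foldl (fun b i => min b (pvV tl i)) b = pvV tl i := by
  induction L with
  | nil => intro b; left; rfl
  | cons a L ih =>
      intro b
      simp only [List.foldl_cons]
      rcases ih (min b (pvV tl a)) with h | ⟨i, hi, h⟩
      · by_cases hv : pvV tl a < b
        · right; exact ⟨a, List.mem_cons_self, by rw [h]; omega⟩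
        · left; rw [h]; omega
      · right; exact ⟨i, List.mem_cons_of_mem _ hi, h⟩

theorem pvV_nonneg (tl : String) (i : Int) : 0 ≤ pvV tl i := by
  unfold pvV
  cases hg : PySem.Dict.get? pvKwIndex (PySem.Str.slice tl (some i) (some (i + 3))) with
  | none =>
      show (0 : Int) ≤ 8
      omega
  | some hit =>
      have hmem := pvGet?_table _ _ hg
      have hr : 0 ≤ hit.2 := by
        simp only [pvEntries, List.mem_cons, List.not_mem_nil, or_false, Prod.mk.injEq] at hmem
        rcases hmem with ⟨_, rfl⟩ | ⟨_, rfl⟩ | ⟨_, rfl⟩ | ⟨_, rfl⟩ | ⟨_, rfl⟩ | ⟨_, rfl⟩ |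
          ⟨_, rfl⟩ | ⟨_, rfl⟩ | ⟨_, rfl⟩ <;> decide
      show 0 ≤ (if PySem.Str.slice tl (some i) (some (i + PySem.Str.len hit.1)) = hit.1
        then hit.2 else 8)
      split_ifs <;> omega

-- a position that contributes rank < 8 really carries a full keyword occurrence
theorem pvV_lt8_isIn (tl : String) (i : Int) (h0 : 0 ≤ i) (h : pvV tl i ≠ 8) :
    ∃ p kw, (p, kw, pvV tl i) ∈ pvEntries ∧ PySem.Str.isIn kw tl = true := by
  rcases hg : PySem.Dict.get? pvKwIndex (PySem.Str.slice tl (some i) (some (i + 3))) with _ | ⟨kw, r⟩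
  · exfalso; apply h; unfold pvV; rw [hg]
  · have hv : pvV tl i =
        if PySem.Str.slice tl (some i) (some (i + PySem.Str.len kw)) = kw then r else 8 := by
      unfold pvV; rw [hg]
    by_cases hf : PySem.Str.slice tl (some i) (some (i + PySem.Str.len kw)) = kw
    · rw [hv, if_pos hf]
      refine ⟨_, kw, pvGet?_table _ _ hg, ?_⟩
      -- full match at i ⇒ kw is an infix of tl
      have hl : (PySem.Str.slice tl (some i) (some (i + PySem.Str.len kw))).toList
          = kw.toList := by rw [hf]
      have hi : i = ((i.toNat : Nat) : Int) := (Int.toNat_of_nonneg h0).symm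
      have hlen : PySem.Str.len kw = ((kw.toList.length : Nat) : Int) := by simp
      rw [hi, hlen, pvWindow_toList] at hl
      have hpre : kw.toList <+: tl.toList.drop i.toNat :=
        (List.prefix_iff_eq_take).mpr hl.symm
      exact (PySem.Str.isIn_iff_infix _ _).mpr
        (hpre.isInfix.trans (List.drop_suffix _ _).isInfix)
    · exact absurd (by rw [hv, if_neg hf]) h

-- conversely: an occurring keyword is detected at some scanned position, with its rank
theorem pvIsIn_exists (tl p kw : String) (r : Int)
    (hlen : 3 ≤ kw.toList.length) (hpre : p.toList = kw.toList.take 3)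
    (hget : PySem.Dict.get? pvKwIndex p = some (kw, r))
    (hIn : PySem.Str.isIn kw tl = true) :
    ∃ i ∈ PySem.List.pyRange 0 (PySem.Str.len tl - 2) 1, pvV tl i = r := by
  rw [PySem.Str.isIn_eq] at hIn
  obtain ⟨j, hj⟩ := (PySem.Chars.exists_prefix_drop_iff_isIn _ _).mpr hIn
  have hjle : j + kw.toList.length ≤ tl.toList.length := by
    by_cases hc : j ≤ tl.toList.length
    · have := hj.length_le
      simp only [List.length_drop] at this
      omega
    · exfalso
      rw [List.drop_eq_nil_of_le (by omega)] at hj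
      have h0 : kw.toList = [] := List.prefix_nil.mp hj
      rw [h0] at hlen; simp at hlen
  refine ⟨(j : Int), ?_, ?_⟩
  · rw [PySem.List.mem_pyRange_one]
    constructor
    · exact Int.natCast_nonneg j
    · have : PySem.Str.len tl = ((tl.toList.length : Nat) : Int) := by simp
      rw [this]; omega
  · unfold pvV
    -- the 3-char window at j is exactly the prefix p
    have hwin : PySem.Str.slice tl (some (j : Int)) (some ((j : Int) + 3)) = p := by
      apply String.toList_inj.mp
      have h3 : ((j : Int) + 3) = ((j : Int) + ((3 : Nat) : Int)) := by norm_num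
      rw [h3, pvWindow_toList]
      obtain ⟨t, ht⟩ := hj
      rw [hpre, ← ht, List.take_append_of_le_length (by omega)]
    rw [hwin, hget]
    -- and the full keyword matches at j
    have hfull : PySem.Str.slice tl (some (j : Int)) (some ((j : Int) + PySem.Str.len kw)) = kw := by
      apply String.toList_inj.mp
      have hlen' : PySem.Str.len kw = ((kw.toList.length : Nat) : Int) := by simp
      rw [hlen', pvWindow_toList]
      exact ((List.prefix_iff_eq_take).mp hj).symm
    show (if PySem.Str.slice tl (some (j : Int)) (some ((j : Int) + PySem.Str.len kw)) = kw
      then r else 8) = r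
    rw [if_pos hfull]

-- which isIn fact each rank value certifies
theorem pvRank_isIn (tl : String) (v : Int)
    (h : ∃ p kw, (p, kw, v) ∈ pvEntries ∧ PySem.Str.isIn kw tl = true) :
    (v = 0 ∧ PySem.Str.isIn "nba" tl = true) ∨
    (v = 1 ∧ PySem.Str.isIn "nfl" tl = true) ∨
    (v = 2 ∧ PySem.Str.isIn "nhl" tl = true) ∨
    (v = 3 ∧ (PySem.Str.isIn "cs2" tl = true ∨ PySem.Str.isIn "csgo" tl = true)) ∨
    (v = 4 ∧ PySem.Str.isIn "dota" tl = true) ∨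
    (v = 5 ∧ PySem.Str.isIn "lol" tl = true) ∨
    (v = 6 ∧ PySem.Str.isIn "valorant" tl = true) ∨
    (v = 7 ∧ PySem.Str.isIn "esport" tl = true) := by
  obtain ⟨p, kw, hmem, hIn⟩ := h
  simp only [pvEntries, List.mem_cons, List.not_mem_nil, or_false, Prod.mk.injEq] at hmem
  rcases hmem with ⟨_, h2, h3⟩ | ⟨_, h2, h3⟩ | ⟨_, h2, h3⟩ | ⟨_, h2, h3⟩ | ⟨_, h2, h3⟩ |
    ⟨_, h2, h3⟩ | ⟨_, h2, h3⟩ | ⟨_, h2, h3⟩ | ⟨_, h2, h3⟩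
  · exact Or.inl ⟨h3, h2 ▸ hIn⟩
  · exact Or.inr (Or.inl ⟨h3, h2 ▸ hIn⟩)
  · exact Or.inr (Or.inr (Or.inl ⟨h3, h2 ▸ hIn⟩))
  · exact Or.inr (Or.inr (Or.inr (Or.inl ⟨h3, Or.inl (h2 ▸ hIn)⟩)))
  · exact Or.inr (Or.inr (Or.inr (Or.inl ⟨h3, Or.inr (h2 ▸ hIn)⟩)))
  · exact Or.inr (Or.inr (Or.inr (Or.inr (Or.inl ⟨h3, h2 ▸ hIn⟩))))
  · exact Or.inr (Or.inr (Or.inr (Or.inr (Or.inr (Or.inl ⟨h3, h2 ▸ hIn⟩)))))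
  · exact Or.inr (Or.inr (Or.inr (Or.inr (Or.inr (Or.inr (Or.inl ⟨h3, h2 ▸ hIn⟩))))))
  · exact Or.inr (Or.inr (Or.inr (Or.inr (Or.inr (Or.inr (Or.inr ⟨h3, h2 ▸ hIn⟩))))))

-- ===== VERDICT (by name: the statement is the Claim_ definition above) =====
set_option maxHeartbeats 2000000 in
theorem detect_sport_from_ticker_py_spec : Claim_equal_detect_sport_from_ticker_py := by
  intro ticker _
  unfold Spec_detect_sport_from_ticker_py
  simp only [detect_sport_from_ticker_py, detect_sport_from_ticker_py_alt]
  set tl := PySem.Str.lower ticker with htl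
  set L := PySem.List.pyRange 0 (PySem.Str.len tl - 2) 1 with hL
  rw [pvFold_min tl L 8 (by omega)]
  set M := L.foldl (fun b i => min b (pvV tl i)) 8 with hM
  -- global facts about M
  have hMle8 : M ≤ 8 := pvFoldMin_le tl L 8
  have hM0 : 0 ≤ M := by
    rcases pvFoldMin_cases tl L 8 with h | ⟨i, _, h⟩
    · omega
    · rw [hM, h]; exact pvV_nonneg tl i
  -- if some keyword occurs, M is at most its rank
  have hUB : ∀ p kw : String, ∀ r : Int, 3 ≤ kw.toList.length → p.toList = kw.toList.take 3 →
      PySem.Dict.get? pvKwIndex p = some (kw, r) → PySem.Str.isIn kw tl = true → M ≤ r := by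
    intro p kw r h1 h2 h3 h4
    obtain ⟨i, hiL, hvi⟩ := pvIsIn_exists tl p kw r h1 h2 h3 h4
    rw [hM, ← hvi]
    exact pvFoldMin_le_v tl L 8 i hiL
  -- if M < 8, M is the rank of some occurring keyword
  have hLB : M ≠ 8 →
      (M = 0 ∧ PySem.Str.isIn "nba" tl = true) ∨
      (M = 1 ∧ PySem.Str.isIn "nfl" tl = true) ∨
      (M = 2 ∧ PySem.Str.isIn "nhl" tl = true) ∨
      (M = 3 ∧ (PySem.Str.isIn "cs2" tl = true ∨ PySem.Str.isIn "csgo" tl = true)) ∨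
      (M = 4 ∧ PySem.Str.isIn "dota" tl = true) ∨
      (M = 5 ∧ PySem.Str.isIn "lol" tl = true) ∨
      (M = 6 ∧ PySem.Str.isIn "valorant" tl = true) ∨
      (M = 7 ∧ PySem.Str.isIn "esport" tl = true) := by
    intro hne
    rcases pvFoldMin_cases tl L 8 with h | ⟨i, hiL, h⟩
    · exact absurd (hM.trans h) hne
    · have h0i : 0 ≤ i := ((PySem.List.mem_pyRange_one).mp (hL ▸ hiL)).1
      have := pvV_lt8_isIn tl i h0i (by rw [← h, ← hM]; exact hne)
      rw [← h, ← hM] at this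
      exact pvRank_isIn tl M this
  have hany : ((["cs2", "csgo"].any fun keyword => PySem.Str.isIn keyword tl) = true) ↔
      (PySem.Str.isIn "cs2" tl = true ∨ PySem.Str.isIn "csgo" tl = true) := by simp
  -- now decide the ladder by cases on the eight membership tests
  by_cases c0 : PySem.Str.isIn "nba" tl = true
  · have : M = 0 := le_antisymm (hUB "nba" "nba" 0 (by decide) (by decide) (by decide) c0) hM0
    rw [this, if_pos c0]; decide
  · by_cases c1 : PySem.Str.isIn "nfl" tl = true
    · have hub := hUB "nfl" "nfl" 1 (by decide) (by decide) (by decide) c1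
      have : M = 1 := by
        rcases hLB (by omega) with ⟨h, hc⟩ | ⟨h, hc⟩ | ⟨h, hc⟩ | ⟨h, hc⟩ | ⟨h, hc⟩ | ⟨h, hc⟩ | ⟨h, hc⟩ | ⟨h, hc⟩
        · exact absurd hc c0
        · omega
        · omega
        · omega
        · omega
        · omega
        · omega
        · omega
      rw [this, if_neg c0, if_pos c1]; decide
    · by_cases c2 : PySem.Str.isIn "nhl" tl = true
      · have hub := hUB "nhl" "nhl" 2 (by decide) (by decide) (by decide) c2
        have : M = 2 := by
          rcases hLB (by omega) with ⟨h, hc⟩ | ⟨h, hc⟩ | ⟨h, hc⟩ | ⟨h, hc⟩ | ⟨h, hc⟩ | ⟨h, hc⟩ | ⟨h, hc⟩ | ⟨h, hc⟩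
          · exact absurd hc c0
          · exact absurd hc c1
          · omega
          · omega
          · omega
          · omega
          · omega
          · omega
        rw [this, if_neg c0, if_neg c1, if_pos c2]; decide
      · by_cases c3a : PySem.Str.isIn "cs2" tl = true
        · have hub := hUB "cs2" "cs2" 3 (by decide) (by decide) (by decide) c3a
          have : M = 3 := by
            rcases hLB (by omega) with ⟨h, hc⟩ | ⟨h, hc⟩ | ⟨h, hc⟩ | ⟨h, hc⟩ | ⟨h, hc⟩ | ⟨h, hc⟩ | ⟨h, hc⟩ | ⟨h, hc⟩
            · exact absurd hc c0
            · exact absurd hc c1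
            · exact absurd hc c2
            · omega
            · omega
            · omega
            · omega
            · omega
          rw [this, if_neg c0, if_neg c1, if_neg c2, if_pos (hany.mpr (Or.inl c3a))]; decide
        · by_cases c3b : PySem.Str.isIn "csgo" tl = true
          · have hub := hUB "csg" "csgo" 3 (by decide) (by decide) (by decide) c3b
            have : M = 3 := by
              rcases hLB (by omega) with ⟨h, hc⟩ | ⟨h, hc⟩ | ⟨h, hc⟩ | ⟨h, hc⟩ | ⟨h, hc⟩ | ⟨h, hc⟩ | ⟨h, hc⟩ | ⟨h, hc⟩
              · exact absurd hc c0
              · exact absurd hc c1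
              · exact absurd hc c2
              · omega
              · omega
              · omega
              · omega
              · omega
            rw [this, if_neg c0, if_neg c1, if_neg c2, if_pos (hany.mpr (Or.inr c3b))]; decide
          · by_cases c4 : PySem.Str.isIn "dota" tl = true
            · have hub := hUB "dot" "dota" 4 (by decide) (by decide) (by decide) c4
              have : M = 4 := by
                rcases hLB (by omega) with ⟨h, hc⟩ | ⟨h, hc⟩ | ⟨h, hc⟩ | ⟨h, hc⟩ | ⟨h, hc⟩ | ⟨h, hc⟩ | ⟨h, hc⟩ | ⟨h, hc⟩
                · exact absurd hc c0
                · exact absurd hc c1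
                · exact absurd hc c2
                · rcases hc with hc | hc
                  · exact absurd hc c3a
                  · exact absurd hc c3b
                · omega
                · omega
                · omega
                · omega
              rw [this, if_neg c0, if_neg c1, if_neg c2, if_neg (fun h => ((hany.mp h).elim c3a c3b)), if_pos c4]; decide
            · by_cases c5 : PySem.Str.isIn "lol" tl = true
              · have hub := hUB "lol" "lol" 5 (by decide) (by decide) (by decide) c5
                have : M = 5 := by
                  rcases hLB (by omega) with ⟨h, hc⟩ | ⟨h, hc⟩ | ⟨h, hc⟩ | ⟨h, hc⟩ | ⟨h, hc⟩ | ⟨h, hc⟩ | ⟨h, hc⟩ | ⟨h, hc⟩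
                  · exact absurd hc c0
                  · exact absurd hc c1
                  · exact absurd hc c2
                  · rcases hc with hc | hc
                    · exact absurd hc c3a
                    · exact absurd hc c3b
                  · exact absurd hc c4
                  · omega
                  · omega
                  · omega
                rw [this, if_neg c0, if_neg c1, if_neg c2, if_neg (fun h => ((hany.mp h).elim c3a c3b)), if_neg c4, if_pos c5]; decide
              · by_cases c6 : PySem.Str.isIn "valorant" tl = true
                · have hub := hUB "val" "valorant" 6 (by decide) (by decide) (by decide) c6
                  have : M = 6 := by
                    rcases hLB (by omega) with ⟨h, hc⟩ | ⟨h, hc⟩ | ⟨h, hc⟩ | ⟨h, hc⟩ | ⟨h, hc⟩ | ⟨h, hc⟩ | ⟨h, hc⟩ | ⟨h, hc⟩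
                    · exact absurd hc c0
                    · exact absurd hc c1
                    · exact absurd hc c2
                    · rcases hc with hc | hc
                      · exact absurd hc c3a
                      · exact absurd hc c3b
                    · exact absurd hc c4
                    · exact absurd hc c5
                    · omega
                    · omega
                  rw [this, if_neg c0, if_neg c1, if_neg c2, if_neg (fun h => ((hany.mp h).elim c3a c3b)), if_neg c4, if_neg c5, if_pos c6]; decide
                · by_cases c7 : PySem.Str.isIn "esport" tl = true
                  · have hub := hUB "esp" "esport" 7 (by decide) (by decide) (by decide) c7
                    have : M = 7 := by
                      rcases hLB (by omega) with ⟨h, hc⟩ | ⟨h, hc⟩ | ⟨h, hc⟩ | ⟨h, hc⟩ | ⟨h, hc⟩ | ⟨h, hc⟩ | ⟨h, hc⟩ | ⟨h, hc⟩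
                      · exact absurd hc c0
                      · exact absurd hc c1
                      · exact absurd hc c2
                      · rcases hc with hc | hc
                        · exact absurd hc c3a
                        · exact absurd hc c3b
                      · exact absurd hc c4
                      · exact absurd hc c5
                      · exact absurd hc c6
                      · omega
                    rw [this, if_neg c0, if_neg c1, if_neg c2, if_neg (fun h => ((hany.mp h).elim c3a c3b)), if_neg c4, if_neg c5, if_neg c6, if_pos c7]; decide
                  · have : M = 8 := by
                      rcases (em (M = 8)) with h | h
                      · exact h
                      · rcases hLB h with ⟨_, hc⟩ | ⟨_, hc⟩ | ⟨_, hc⟩ | ⟨_, hc⟩ | ⟨_, hc⟩ | ⟨_, hc⟩ | ⟨_, hc⟩ | ⟨_, hc⟩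
                        · exact absurd hc c0
                        · exact absurd hc c1
                        · exact absurd hc c2
                        · rcases hc with hc | hc
                          · exact absurd hc c3a
                          · exact absurd hc c3b
                        · exact absurd hc c4
                        · exact absurd hc c5
                        · exact absurd hc c6
                        · exact absurd hc c7
                    rw [this, if_neg c0, if_neg c1, if_neg c2, if_neg (fun h => ((hany.mp h).elim c3a c3b)), if_neg c4, if_neg c5, if_neg c6, if_neg c7]; decide
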